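-- pv_equiv track=rewrite | github.com/IgrMd/yandex-algos-training | Тренировки по алгоритмам 8.0/Тема 7, 8. Префиксные суммы и два указателя. Сортировка событий/G.py | planning_series
-- ===== SOURCE A (Python) =====
-- from bisect import bisect_left
--
-- SUM_SA = 0
--
-- SUM_A = 1
--
-- def planning_series(n: int, s: list[int], a: list[int]):
--     sa_sorted = []
--     for i in range(n):
--         sa_sorted.append((s[i], a[i]))
--     sa_sorted.sort()
--     prefs = [(0, 0)]
--     for si, ai in sa_sorted:
--         prev = prefs[-1]
--         prefs.append((si * ai + prev[SUM_SA], ai + prev[SUM_A]))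
--     ans_e, ans_cost = float('inf'), float('inf')
--
--     for e in range(1, max(s) + 1):
--         j = bisect_left(a=sa_sorted, x=e, lo=0, hi=n, key=lambda x: x[0])
--         curr = 2 * e * prefs[j][SUM_A] - 2 * prefs[j][SUM_SA] + prefs[-1][SUM_SA] - e * prefs[-1][SUM_A]
--         if curr < ans_cost:
--             ans_cost = curr
--             ans_e = e
--     return ans_e, ans_cost
-- ===== SOURCE B (Python) =====
-- from bisect import bisect_left
--
--
-- def planning_series(n: int, s: list[int], a: list[int]):
--     pairs = sorted((s[i], a[i]) for i in range(n))
--     xs = [p[0] for p in pairs]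
--     ps, pa = [0], [0]
--     for si, ai in pairs:
--         ps.append(ps[-1] + si * ai)
--         pa.append(pa[-1] + ai)
--     m = max(s)
--
--     def cost(e):
--         j = bisect_left(xs, e)
--         return 2 * e * pa[j] - 2 * ps[j] + ps[-1] - e * pa[-1]
--
--     cands = [1, m] + [e for x in xs for e in (x, x + 1)]
--     best_c, best_e = min((cost(e), e) for e in cands if 1 <= e <= m)
--     return best_e, best_c
-- ===== Notes on version B (the rewrite author's own statement) =====
-- stated objective: faster
-- what changed: Instead of scanning every integer e in 1..max(s) with a bisect per e, B exploits that the weighted absolute-deviation cost is piecewise linear: it sorts once, builds prefix sums, and evaluates the cost only at the O(n) breakpoint candidates {1, max(s)} and {s_i, s_i+1}, taking the lexicographic minimum of (cost, e).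
-- outside the precondition, e.g. on planning_series(1, [0], [5]): A returns (inf, inf), B raises ValueError
import Mathlib
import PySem

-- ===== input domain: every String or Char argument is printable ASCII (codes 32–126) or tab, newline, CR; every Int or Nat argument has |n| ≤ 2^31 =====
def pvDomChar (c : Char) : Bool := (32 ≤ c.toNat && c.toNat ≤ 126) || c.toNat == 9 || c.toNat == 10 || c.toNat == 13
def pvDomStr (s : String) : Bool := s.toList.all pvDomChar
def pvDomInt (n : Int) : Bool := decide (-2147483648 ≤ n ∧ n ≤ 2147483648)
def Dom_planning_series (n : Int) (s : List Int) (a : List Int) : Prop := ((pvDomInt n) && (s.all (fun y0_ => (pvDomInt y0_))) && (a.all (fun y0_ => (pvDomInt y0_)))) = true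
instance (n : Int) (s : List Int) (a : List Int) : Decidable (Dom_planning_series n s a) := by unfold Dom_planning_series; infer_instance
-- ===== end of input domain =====

-- B replaces A's scan of every e in 1..max(s) (a bisect per e) by evaluating the piecewise-linear
-- cost only at the O(n) breakpoint candidates {1, max(s), s_i, s_i+1}: asymptotically faster.

-- ===== PORT A =====
-- the body of A's e-loop: curr = 2*e*prefs[j][1] - 2*prefs[j][0] + prefs[-1][0] - e*prefs[-1][1]
-- (bisect_left with key=x[0], lo=0, hi=n is the binary search on the fst-projection; exact under Pre_)
def planningCurrA (saS : List (Int × Int)) (prefs : List (Int × Int)) (e : Int) : Int :=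
  let j := PySem.List.bisectLeft (saS.map (fun p => p.1)) e
  let prj := PySem.List.pyGetD prefs (j : Int) ((0 : Int), (0 : Int))
  let prl := PySem.List.pyGetD prefs (-1) ((0 : Int), (0 : Int))
  2 * e * prj.2 - 2 * prj.1 + prl.1 - e * prl.2

-- the 'if curr < ans_cost' update; the 'none' state is Python's (inf, inf) start,
-- which every int curr beats
def planningStepA (curr : Int → Int) (st : Option (Int × Int)) (e : Int) : Option (Int × Int) :=
  match st with
  | none => some (e, curr e)
  | some (ae, ac) => if curr e < ac then some (e, curr e) else some (ae, ac)

def planning_series (n : Int) (s : List Int) (a : List Int) : Int × Int :=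
  -- for i in range(n): sa_sorted.append((s[i], a[i]))
  let sa := (PySem.List.pyRange 0 n).foldl
      (fun acc i => acc ++ [(PySem.List.pyGetD s i 0, PySem.List.pyGetD a i 0)]) []
  -- sa_sorted.sort()  (tuples compare lexicographically)
  let saS := PySem.List.sorted2 sa (fun p => p.1) (fun p => p.2)
  -- prefs = [(0,0)]; for si, ai in sa_sorted: prefs.append((si*ai + prev[0], ai + prev[1]))
  let prefs := saS.foldl
      (fun pr p =>
        pr ++ [(p.1 * p.2 + (PySem.List.pyGetD pr (-1) ((0 : Int), (0 : Int))).1,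
                p.2 + (PySem.List.pyGetD pr (-1) ((0 : Int), (0 : Int))).2)])
      [((0 : Int), (0 : Int))]
  -- max(s)  (raises ValueError on s = []: excluded by Pre_)
  let m := (PySem.List.max? s (fun x => x)).getD 0
  -- for e in range(1, max(s)+1): …
  match (PySem.List.pyRange 1 (m + 1)).foldl (planningStepA (planningCurrA saS prefs)) none with
  | some r => r
  | none => (0, 0)  -- Python returns the floats (inf, inf) here; excluded by Pre_

-- ===== PORT B =====
-- B's nested 'def cost(e)': j = bisect_left(xs, e); 2*e*pa[j] - 2*ps[j] + ps[-1] - e*pa[-1]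
def planningCostB (xs ps pa : List Int) (e : Int) : Int :=
  let j := PySem.List.bisectLeft xs e
  2 * e * PySem.List.pyGetD pa (j : Int) 0 - 2 * PySem.List.pyGetD ps (j : Int) 0
    + PySem.List.pyGetD ps (-1) 0 - e * PySem.List.pyGetD pa (-1) 0

def planning_series_alt (n : Int) (s : List Int) (a : List Int) : Int × Int :=
  -- pairs = sorted((s[i], a[i]) for i in range(n))
  let pairs := PySem.List.sorted2
      ((PySem.List.pyRange 0 n).foldl
        (fun acc i => acc ++ [(PySem.List.pyGetD s i 0, PySem.List.pyGetD a i 0)]) [])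
      (fun p => p.1) (fun p => p.2)
  -- xs = [p[0] for p in pairs]
  let xs := pairs.map (fun p => p.1)
  -- ps, pa = [0], [0]; for si, ai in pairs: ps.append(ps[-1]+si*ai); pa.append(pa[-1]+ai)
  let pp := pairs.foldl
      (fun (pp : List Int × List Int) p =>
        (pp.1 ++ [PySem.List.pyGetD pp.1 (-1) 0 + p.1 * p.2],
         pp.2 ++ [PySem.List.pyGetD pp.2 (-1) 0 + p.2])) ([(0 : Int)], [(0 : Int)])
  -- m = max(s)
  let m := (PySem.List.max? s (fun x => x)).getD 0
  -- cands = [1, m] + [e for x in xs for e in (x, x + 1)]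
  let cands := [1, m] ++ xs.flatMap (fun x => [x, x + 1])
  -- best_c, best_e = min((cost(e), e) for e in cands if 1 <= e <= m); return best_e, best_c
  match PySem.List.min2? (cands.filter (fun e => decide (1 ≤ e) && decide (e ≤ m)))
      (planningCostB xs pp.1 pp.2) (fun e => e) with
  | some e => (e, planningCostB xs pp.1 pp.2 e)
  | none => (0, 0)  -- Python's min on the empty generator raises ValueError here; excluded by Pre_

-- ===== PRECONDITION & SPEC =====
-- Pre_ requires n ≤ len(s) and n ≤ len(a) when 0 ≤ n (otherwise A raises IndexError),
-- and some element of s ≥ 1 (otherwise A raises ValueError on max of an empty list, or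
-- returns the floats (inf, inf), which are not values of the declared int pair type).
def Pre_planning_series (n : Int) (s : List Int) (a : List Int) : Prop :=
  (n ≤ (s.length : Int) ∧ n ≤ (a.length : Int) ∨ n < 0) ∧ ∃ x ∈ s, 1 ≤ x
instance (n : Int) (s : List Int) (a : List Int) : Decidable (Pre_planning_series n s a) := by
  unfold Pre_planning_series; infer_instance

def pvWitness_planning_series : Int × List Int × List Int := (2, [3, 1], [2, 5])

def Spec_planning_series (n : Int) (s : List Int) (a : List Int) (out : Int × Int) : Prop := out = planning_series_alt n s a
instance (n : Int) (s : List Int) (a : List Int) (out : Int × Int) : Decidable (Spec_planning_series n s a out) := by unfold Spec_planning_series; infer_instance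

-- ===== CLAIM (what is proved, stated in full; the proofs are below) =====
def Claim_equal_planning_series : Prop := ∀ (n : Int) (s : List Int) (a : List Int), Dom_planning_series n s a → Pre_planning_series n s a → Spec_planning_series n s a (planning_series n s a)

-- ===== LEMMAS AND PROOFS =====

-- weighted sums over the pair list, and the piecewise-linear cost pvF
def pvFlt (P : List (Int × Int)) (e : Int) : List (Int × Int) := P.filter (fun p => decide (p.1 < e))
def pvVt (P : List (Int × Int)) : Int := (P.map (fun p => p.1 * p.2)).sum
def pvWt (P : List (Int × Int)) : Int := (P.map (fun p => p.2)).sum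
def pvV (P : List (Int × Int)) (e : Int) : Int := pvVt (pvFlt P e)
def pvW (P : List (Int × Int)) (e : Int) : Int := pvWt (pvFlt P e)
def pvF (P : List (Int × Int)) (e : Int) : Int := 2 * e * pvW P e - 2 * pvV P e + pvVt P - e * pvWt P
def pvPr (P : List (Int × Int)) : List (Int × Int) :=
  (List.range (P.length + 1)).map (fun j => (pvVt (P.take j), pvWt (P.take j)))

def pvStep2 (g : Int → Int) (acc : Option Int) (x : Int) : Option Int :=
  match acc with
  | none => some x
  | some m => if (decide (g x < g m) || (!decide (g m < g x) && decide (x < m))) = true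
      then some x else some m

-- insertion keeps a pairwise bound when `before` decides a total relation R
theorem pv_insertBy_pairwise {A : Type} {R : A → A → Prop} (before : A → A → Bool)
    (h1 : ∀ a b, before a b = true → R a b) (h2 : ∀ a b, before a b = false → R b a)
    (ht : ∀ {a b c : A}, R a b → R b c → R a c) (x : A) :
    ∀ (l : List A), l.Pairwise R → (PySem.List.insertBy before x l).Pairwise R
  | [], _ => by simp [PySem.List.insertBy]
  | y :: ys, hl => by
    rw [List.pairwise_cons] at hl
    obtain ⟨hy, hys⟩ := hl
    by_cases hb : before x y = true
    · rw [show PySem.List.insertBy before x (y :: ys) = x :: y :: ys from by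
        simp [PySem.List.insertBy, hb]]
      refine List.Pairwise.cons ?_ (List.Pairwise.cons hy hys)
      intro z hz
      rcases List.mem_cons.mp hz with h | hz
      · subst h; exact h1 _ _ hb
      · exact ht (h1 _ _ hb) (hy z hz)
    · have hb' : before x y = false := by simpa using hb
      rw [show PySem.List.insertBy before x (y :: ys) = y :: PySem.List.insertBy before x ys from by
        simp [PySem.List.insertBy, hb']]
      refine List.Pairwise.cons ?_ (pv_insertBy_pairwise before h1 h2 ht x ys hys)
      intro z hz
      rcases (PySem.List.mem_insertBy before x z ys).mp hz with h | hz
      · subst h; exact h2 _ _ hb'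
      · exact hy z hz

-- first components of sorted2 by (fst, snd) are nondecreasing
theorem pv_sorted2_pairwise (xs : List (Int × Int)) :
    (PySem.List.sorted2 xs (fun p => p.1) (fun p => p.2)).Pairwise
      (fun p q : Int × Int => p.1 ≤ q.1) := by
  have key : ∀ (l acc : List (Int × Int)),
      acc.Pairwise (fun p q : Int × Int => p.1 ≤ q.1) →
      (l.foldl (fun acc x => PySem.List.insertBy
          (fun a b : Int × Int => decide (a.1 < b.1) || (!decide (b.1 < a.1) && decide (a.2 < b.2)))
          x acc) acc).Pairwise (fun p q : Int × Int => p.1 ≤ q.1) := by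
    intro l
    induction l with
    | nil => intro acc h; simpa using h
    | cons x l ih =>
      intro acc h
      rw [List.foldl_cons]
      apply ih
      refine pv_insertBy_pairwise _ ?_ ?_ ?_ x acc h
      · intro a b hab
        simp only [Bool.or_eq_true, Bool.and_eq_true, Bool.not_eq_true',
          decide_eq_true_eq, decide_eq_false_iff_not] at hab
        rcases hab with h' | ⟨h', _⟩ <;> omega
      · intro a b hab
        simp only [Bool.or_eq_false_iff, decide_eq_false_iff_not] at hab
        have := hab.1
        omega
      · intro a b c h1 h2; omega
  have hdef : PySem.List.sorted2 xs (fun p : Int × Int => p.1) (fun p : Int × Int => p.2) =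
      xs.foldl (fun acc x => PySem.List.insertBy
        (fun a b : Int × Int => decide (a.1 < b.1) || (!decide (b.1 < a.1) && decide (a.2 < b.2)))
        x acc) [] := rfl
  rw [hdef]
  exact key xs [] List.Pairwise.nil

-- pyGetD on a mapped range, at a cast index and at -1
theorem pv_getD_map_range {B : Type} (f : Nat → B) (N j : Nat) (d : B) (hj : j < N) :
    PySem.List.pyGetD ((List.range N).map f) (j : Int) d = f j := by
  rw [PySem.List.pyGetD_natCast, List.getD_eq_getElem?_getD]
  simp [hj]

theorem pv_getD_last_map_range {B : Type} (f : Nat → B) (N : Nat) (d : B) (h : 0 < N) :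
    PySem.List.pyGetD ((List.range N).map f) (-1) d = f (N - 1) := by
  have hne : ((List.range N).map f) ≠ [] := by
    simp only [ne_eq, List.map_eq_nil_iff, List.range_eq_nil]
    omega
  rw [PySem.List.pyGetD_neg_one _ _ hne, List.getLast_eq_getElem]
  simp [List.getElem_map, List.getElem_range]

-- appending one pair extends each prefix table by the new running total
theorem pv_prV_append (Q : List (Int × Int)) (p : Int × Int) :
    (List.range ((Q ++ [p]).length + 1)).map (fun j => pvVt ((Q ++ [p]).take j))
      = (List.range (Q.length + 1)).map (fun j => pvVt (Q.take j)) ++ [pvVt Q + p.1 * p.2] := by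
  rw [List.length_append, List.length_singleton, List.range_succ, List.map_append]
  congr 1
  · apply List.map_congr_left
    intro j hj
    rw [List.mem_range] at hj
    rw [List.take_append_of_le_length (by omega)]
  · rw [List.map_singleton, List.take_of_length_le (by simp)]
    unfold pvVt
    simp [List.sum_append]

theorem pv_prW_append (Q : List (Int × Int)) (p : Int × Int) :
    (List.range ((Q ++ [p]).length + 1)).map (fun j => pvWt ((Q ++ [p]).take j))
      = (List.range (Q.length + 1)).map (fun j => pvWt (Q.take j)) ++ [pvWt Q + p.2] := by
  rw [List.length_append, List.length_singleton, List.range_succ, List.map_append]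
  congr 1
  · apply List.map_congr_left
    intro j hj
    rw [List.mem_range] at hj
    rw [List.take_append_of_le_length (by omega)]
  · rw [List.map_singleton, List.take_of_length_le (by simp)]
    unfold pvWt
    simp [List.sum_append]

theorem pv_pvPr_append (Q : List (Int × Int)) (p : Int × Int) :
    pvPr (Q ++ [p]) = pvPr Q ++ [(pvVt Q + p.1 * p.2, pvWt Q + p.2)] := by
  unfold pvPr
  rw [List.length_append, List.length_singleton, List.range_succ, List.map_append]
  congr 1
  · apply List.map_congr_left
    intro j hj
    rw [List.mem_range] at hj
    rw [List.take_append_of_le_length (by omega)]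
  · rw [List.map_singleton, List.take_of_length_le (by simp)]
    unfold pvVt pvWt
    simp [List.sum_append]

-- the prefs list built by A's loop is pvPr
theorem pv_prefsA (P : List (Int × Int)) :
    P.foldl (fun pr p =>
        pr ++ [(p.1 * p.2 + (PySem.List.pyGetD pr (-1) ((0 : Int), (0 : Int))).1,
                p.2 + (PySem.List.pyGetD pr (-1) ((0 : Int), (0 : Int))).2)])
      [((0 : Int), (0 : Int))] = pvPr P := by
  induction P using List.reverseRecOn with
  | nil => simp [pvPr, pvVt, pvWt]
  | append_singleton Q p ih =>
    rw [List.foldl_append, ih]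
    simp only [List.foldl_cons, List.foldl_nil]
    have hlast : PySem.List.pyGetD (pvPr Q) (-1) ((0 : Int), (0 : Int)) = (pvVt Q, pvWt Q) := by
      unfold pvPr
      rw [pv_getD_last_map_range _ _ _ (by omega)]
      simp
    rw [hlast, pv_pvPr_append]
    congr 1
    simp only [List.cons.injEq, and_true, Prod.mk.injEq]
    constructor <;> ring

-- the two prefix lists built by B's loop
theorem pv_prefsB (P : List (Int × Int)) :
    P.foldl (fun (pp : List Int × List Int) p =>
        (pp.1 ++ [PySem.List.pyGetD pp.1 (-1) 0 + p.1 * p.2],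
         pp.2 ++ [PySem.List.pyGetD pp.2 (-1) 0 + p.2])) ([(0 : Int)], [(0 : Int)])
      = ((List.range (P.length + 1)).map (fun j => pvVt (P.take j)),
         (List.range (P.length + 1)).map (fun j => pvWt (P.take j))) := by
  induction P using List.reverseRecOn with
  | nil => simp [pvVt, pvWt]
  | append_singleton Q p ih =>
    rw [List.foldl_append, ih]
    simp only [List.foldl_cons, List.foldl_nil]
    have h1 : PySem.List.pyGetD ((List.range (Q.length + 1)).map (fun j => pvVt (Q.take j))) (-1) 0
        = pvVt Q := by
      rw [pv_getD_last_map_range _ _ _ (by omega)]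
      simp
    have h2 : PySem.List.pyGetD ((List.range (Q.length + 1)).map (fun j => pvWt (Q.take j))) (-1) 0
        = pvWt Q := by
      rw [pv_getD_last_map_range _ _ _ (by omega)]
      simp
    rw [h1, h2, pv_prV_append, pv_prW_append]

theorem pv_prefsB1 (P : List (Int × Int)) :
    (P.foldl (fun (pp : List Int × List Int) p =>
        (pp.1 ++ [PySem.List.pyGetD pp.1 (-1) 0 + p.1 * p.2],
         pp.2 ++ [PySem.List.pyGetD pp.2 (-1) 0 + p.2])) ([(0 : Int)], [(0 : Int)])).1
      = (List.range (P.length + 1)).map (fun j => pvVt (P.take j)) := by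
  rw [pv_prefsB]

theorem pv_prefsB2 (P : List (Int × Int)) :
    (P.foldl (fun (pp : List Int × List Int) p =>
        (pp.1 ++ [PySem.List.pyGetD pp.1 (-1) 0 + p.1 * p.2],
         pp.2 ++ [PySem.List.pyGetD pp.2 (-1) 0 + p.2])) ([(0 : Int)], [(0 : Int)])).2
      = (List.range (P.length + 1)).map (fun j => pvWt (P.take j)) := by
  rw [pv_prefsB]

-- bisect index: the prefix of the sorted pair list below the index is exactly the filter
theorem pv_bisect_le (P : List (Int × Int))
    (hP : P.Pairwise (fun p q : Int × Int => p.1 ≤ q.1)) (e : Int) :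
    PySem.List.bisectLeft (P.map (fun p => p.1)) e ≤ P.length := by
  have hxs : (P.map (fun p : Int × Int => p.1)).Pairwise (· ≤ ·) :=
    hP.map _ (fun a b h => h)
  have := (PySem.List.bisectLeft_spec (P.map (fun p => p.1)) e hxs).1
  simpa using this

theorem pv_take_bisect (P : List (Int × Int))
    (hP : P.Pairwise (fun p q : Int × Int => p.1 ≤ q.1)) (e : Int) :
    P.take (PySem.List.bisectLeft (P.map (fun p => p.1)) e) = pvFlt P e := by
  have hxs : (P.map (fun p : Int × Int => p.1)).Pairwise (· ≤ ·) :=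
    hP.map _ (fun a b h => h)
  obtain ⟨hle, hlt, hge⟩ := PySem.List.bisectLeft_spec (P.map (fun p => p.1)) e hxs
  set j := PySem.List.bisectLeft (P.map (fun p => p.1)) e with hjdef
  have hlen : (P.map (fun p : Int × Int => p.1)).length = P.length := by simp
  have hjP : j ≤ P.length := by rw [← hlen]; exact hle
  have h1 : (P.take j).filter (fun p => decide (p.1 < e)) = P.take j := by
    apply List.filter_eq_self.mpr
    intro p hp
    rw [List.mem_iff_getElem] at hp
    obtain ⟨i, hi, heq⟩ := hp
    have hij : i < j := by
      rw [List.length_take] at hi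
      omega
    have hiP : i < P.length := by omega
    have hx := hlt i (by omega) hij
    rw [List.getElem_map] at hx
    rw [← heq, List.getElem_take]
    simpa using hx
  have h2 : (P.drop j).filter (fun p => decide (p.1 < e)) = [] := by
    apply List.filter_eq_nil_iff.mpr
    intro p hp
    rw [List.mem_iff_getElem] at hp
    obtain ⟨i, hi, heq⟩ := hp
    have hiP : j + i < P.length := by
      rw [List.length_drop] at hi
      omega
    have hx := hge (j + i) (by omega) (by omega)
    rw [List.getElem_map] at hx
    rw [← heq, List.getElem_drop]
    simp only [decide_eq_true_eq]
    omega
  calc P.take j = (P.take j).filter (fun p => decide (p.1 < e)) := h1.symm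
    _ = (P.take j).filter (fun p => decide (p.1 < e))
          ++ (P.drop j).filter (fun p => decide (p.1 < e)) := by rw [h2, List.append_nil]
    _ = pvFlt P e := by rw [← List.filter_append, List.take_append_drop]; rfl

-- reading the prefix tables at the bisect index / at -1
theorem pv_prjA (P : List (Int × Int))
    (hP : P.Pairwise (fun p q : Int × Int => p.1 ≤ q.1)) (e : Int) :
    PySem.List.pyGetD (pvPr P)
        ((PySem.List.bisectLeft (P.map (fun p => p.1)) e : Nat) : Int) ((0 : Int), (0 : Int))
      = (pvV P e, pvW P e) := by
  unfold pvPr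
  rw [pv_getD_map_range _ _ _ _ (by have := pv_bisect_le P hP e; omega)]
  rw [pv_take_bisect P hP e]
  rfl

theorem pv_prlA (P : List (Int × Int)) :
    PySem.List.pyGetD (pvPr P) (-1) ((0 : Int), (0 : Int)) = (pvVt P, pvWt P) := by
  unfold pvPr
  rw [pv_getD_last_map_range _ _ _ (by omega)]
  simp

theorem pv_prjV (P : List (Int × Int))
    (hP : P.Pairwise (fun p q : Int × Int => p.1 ≤ q.1)) (e : Int) :
    PySem.List.pyGetD ((List.range (P.length + 1)).map (fun j => pvVt (P.take j)))
        ((PySem.List.bisectLeft (P.map (fun p => p.1)) e : Nat) : Int) 0 = pvV P e := by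
  rw [pv_getD_map_range _ _ _ _ (by have := pv_bisect_le P hP e; omega)]
  rw [pv_take_bisect P hP e]
  rfl

theorem pv_prjW (P : List (Int × Int))
    (hP : P.Pairwise (fun p q : Int × Int => p.1 ≤ q.1)) (e : Int) :
    PySem.List.pyGetD ((List.range (P.length + 1)).map (fun j => pvWt (P.take j)))
        ((PySem.List.bisectLeft (P.map (fun p => p.1)) e : Nat) : Int) 0 = pvW P e := by
  rw [pv_getD_map_range _ _ _ _ (by have := pv_bisect_le P hP e; omega)]
  rw [pv_take_bisect P hP e]
  rfl

theorem pv_prlV (P : List (Int × Int)) :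
    PySem.List.pyGetD ((List.range (P.length + 1)).map (fun j => pvVt (P.take j))) (-1) 0
      = pvVt P := by
  rw [pv_getD_last_map_range _ _ _ (by omega)]
  simp

theorem pv_prlW (P : List (Int × Int)) :
    PySem.List.pyGetD ((List.range (P.length + 1)).map (fun j => pvWt (P.take j))) (-1) 0
      = pvWt P := by
  rw [pv_getD_last_map_range _ _ _ (by omega)]
  simp

-- A's scan over a strictly increasing list keeps the first minimiser
theorem pv_loopA (g : Int → Int) :
    ∀ (l : List Int) (b : Int), l.Pairwise (· < ·) → (∀ y ∈ l, b < y) →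
    ∃ r, l.foldl (planningStepA g) (some (b, g b)) = some (r, g r) ∧ r ∈ b :: l ∧
      (∀ y ∈ b :: l, g r ≤ g y) ∧ (∀ y ∈ b :: l, g y = g r → r ≤ y)
  | [], b, _, _ => ⟨b, rfl, by simp, by simp, by simp⟩
  | e :: l, b, hp, hb => by
    rw [List.pairwise_cons] at hp
    obtain ⟨hel, hl⟩ := hp
    rw [List.foldl_cons]
    by_cases hc : g e < g b
    · rw [show planningStepA g (some (b, g b)) e = some (e, g e) from by
        simp [planningStepA, hc]]
      obtain ⟨r, hfold, hmem, hmin, htie⟩ := pv_loopA g l e hl hel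
      refine ⟨r, hfold, ?_, ?_, ?_⟩
      · rcases List.mem_cons.mp hmem with h | h
        · simp [h]
        · simp [h]
      · intro y hy
        rcases List.mem_cons.mp hy with h | hy
        · subst h
          exact le_of_lt (lt_of_le_of_lt (hmin e List.mem_cons_self) hc)
        · exact hmin y hy
      · intro y hy hgy
        rcases List.mem_cons.mp hy with h | hy
        · subst h
          exfalso
          have := hmin e List.mem_cons_self
          omega
        · exact htie y hy hgy
    · rw [show planningStepA g (some (b, g b)) e = some (b, g b) from by
        simp [planningStepA, hc]]
      obtain ⟨r, hfold, hmem, hmin, htie⟩ :=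
        pv_loopA g l b hl (fun y hy => hb y (List.mem_cons_of_mem _ hy))
      refine ⟨r, hfold, ?_, ?_, ?_⟩
      · rcases List.mem_cons.mp hmem with h | h
        · simp [h]
        · simp [h]
      · intro y hy
        rcases List.mem_cons.mp hy with h | hy
        · subst h
          exact hmin y List.mem_cons_self
        · rcases List.mem_cons.mp hy with h | hy
          · subst h
            exact le_trans (hmin b List.mem_cons_self) (not_lt.mp hc)
          · exact hmin y (List.mem_cons_of_mem _ hy)
      · intro y hy hgy
        rcases List.mem_cons.mp hy with h | hy
        · subst h
          exact htie y List.mem_cons_self hgy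
        · rcases List.mem_cons.mp hy with h | hy
          · subst h
            have hrb : r ≤ b := by
              apply htie b List.mem_cons_self
              have h1 := hmin b List.mem_cons_self
              have h2 := not_lt.mp hc
              omega
            have := hb y List.mem_cons_self
            omega
          · exact htie y (List.mem_cons_of_mem _ hy) hgy

-- B's min over (cost, e) tuples picks the smallest minimiser
theorem pv_min2_aux (g : Int → Int) :
    ∀ (t : List Int) (c : Int),
    ∃ r, t.foldl (pvStep2 g) (some c) = some r ∧ r ∈ c :: t ∧
      ∀ y ∈ c :: t, g r < g y ∨ (g r = g y ∧ r ≤ y)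
  | [], c => ⟨c, rfl, by simp, by simp⟩
  | x :: t, c => by
    rw [List.foldl_cons]
    by_cases hcond : (decide (g x < g c) || (!decide (g c < g x) && decide (x < c))) = true
    · rw [show pvStep2 g (some c) x = some x from by simp only [pvStep2]; rw [if_pos hcond]]
      obtain ⟨r, hfold, hmem, hprop⟩ := pv_min2_aux g t x
      refine ⟨r, hfold, ?_, ?_⟩
      · rcases List.mem_cons.mp hmem with h | h
        · simp [h]
        · simp [h]
      · intro y hy
        rcases List.mem_cons.mp hy with h | hy
        · subst h
          simp only [Bool.or_eq_true, Bool.and_eq_true, Bool.not_eq_true',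
            decide_eq_true_eq, decide_eq_false_iff_not] at hcond
          have hx := hprop x List.mem_cons_self
          by_cases h5 : g x < g y
          · rcases hx with h3 | ⟨h3, h4⟩
            · left; omega
            · left; omega
          · have h6 : g x = g y := by
              rcases hcond with h' | ⟨h', h''⟩ <;> omega
            have h7 : x < y := by
              rcases hcond with h' | ⟨h', h''⟩ <;> omega
            rcases hx with h3 | ⟨h3, h4⟩
            · left; omega
            · right; constructor <;> omega
        · exact hprop y hy
    · rw [show pvStep2 g (some c) x = some c from by simp only [pvStep2]; rw [if_neg hcond]]
      obtain ⟨r, hfold, hmem, hprop⟩ := pv_min2_aux g t c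
      refine ⟨r, hfold, ?_, ?_⟩
      · rcases List.mem_cons.mp hmem with h | h
        · simp [h]
        · simp [h]
      · intro y hy
        rcases List.mem_cons.mp hy with h | hy
        · subst h
          exact hprop y List.mem_cons_self
        · rcases List.mem_cons.mp hy with h | hy
          · subst h
            simp only [Bool.or_eq_true, Bool.and_eq_true, Bool.not_eq_true',
              decide_eq_true_eq, decide_eq_false_iff_not, not_or, not_and, not_lt] at hcond
            obtain ⟨h1, h2⟩ := hcond
            have hc2 : g c < g y ∨ c ≤ y := by
              by_cases h3 : g c < g y
              · left; exact h3
              · right; exact h2 (by omega)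
            have hrc := hprop c List.mem_cons_self
            rcases hrc with h3 | ⟨h3, h4⟩
            · left; omega
            · rcases hc2 with h5 | h5
              · left; omega
              · by_cases h6 : g r < g y
                · left; exact h6
                · right; constructor <;> omega
          · exact hprop y (List.mem_cons_of_mem _ hy)

theorem pv_min2_eq_foldl (g : Int → Int) (l : List Int) :
    PySem.List.min2? l g (fun e => e) = l.foldl (pvStep2 g) none := by
  unfold PySem.List.min2?
  congr 1
  funext acc x
  cases acc with
  | none => rfl
  | some m => simp [pvStep2]

theorem pv_min2_spec (g : Int → Int) (l : List Int) (hne : l ≠ []) :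
    ∃ r, PySem.List.min2? l g (fun e => e) = some r ∧ r ∈ l ∧
      ∀ y ∈ l, g r < g y ∨ (g r = g y ∧ r ≤ y) := by
  cases l with
  | nil => exact absurd rfl hne
  | cons c t =>
    rw [pv_min2_eq_foldl, List.foldl_cons]
    rw [show pvStep2 g none c = some c from rfl]
    exact pv_min2_aux g t c

-- the cost is linear between breakpoints
theorem pv_flt_congr (P : List (Int × Int)) (e : Int) (h : ∀ p ∈ P, p.1 ≠ e) :
    pvFlt P (e + 1) = pvFlt P e := by
  unfold pvFlt
  apply List.filter_congr
  intro p hp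
  have := h p hp
  simp only [decide_eq_decide]
  omega

theorem pv_slope (P : List (Int × Int)) (e : Int) (h : ∀ p ∈ P, p.1 ≠ e) :
    pvF P (e + 1) - pvF P e = 2 * pvW P e - pvWt P := by
  unfold pvF pvW pvV
  rw [pv_flt_congr P e h]
  ring

-- ===== VERDICT (by name: the statement is the Claim_ definition above) =====
theorem planning_series_spec : Claim_equal_planning_series := by
  intro n s a _ hpre
  obtain ⟨hidx, x, hxmem, hx1⟩ := hpre
  have hsne : s ≠ [] := by
    intro h
    subst h
    simp at hxmem
  obtain ⟨mx, hmx⟩ : ∃ mx, PySem.List.max? s (fun x => x) = some mx := by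
    cases h : PySem.List.max? s (fun x => x) with
    | none => exact absurd ((PySem.List.max?_eq_none_iff s _).mp h) hsne
    | some mx => exact ⟨mx, rfl⟩
  have hm1 : (1 : Int) ≤ mx := le_trans hx1 (PySem.List.max?_isMax hmx x hxmem)
  unfold Spec_planning_series
  simp only [planning_series, planning_series_alt]
  set P := PySem.List.sorted2
      ((PySem.List.pyRange 0 n).foldl
        (fun acc i => acc ++ [(PySem.List.pyGetD s i 0, PySem.List.pyGetD a i 0)]) [])
      (fun p : Int × Int => p.1) (fun p : Int × Int => p.2) with hPdef
  have hsor : P.Pairwise (fun p q : Int × Int => p.1 ≤ q.1) := by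
    rw [hPdef]
    exact pv_sorted2_pairwise _
  set M := (PySem.List.max? s (fun x => x)).getD 0 with hMdef
  have hM : M = mx := by rw [hMdef, hmx]; rfl
  have hm1' : (1 : Int) ≤ M := by rw [hM]; exact hm1
  rw [pv_prefsA P, pv_prefsB1 P, pv_prefsB2 P]
  -- both cost functions are pvF P
  have hcurrA : planningCurrA P (pvPr P) = pvF P := by
    funext e
    simp only [planningCurrA, pv_prjA P hsor, pv_prlA P]
    rfl
  have hcostB : planningCostB (P.map (fun p => p.1))
      ((List.range (P.length + 1)).map (fun j => pvVt (P.take j)))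
      ((List.range (P.length + 1)).map (fun j => pvWt (P.take j))) = pvF P := by
    funext e
    simp only [planningCostB, pv_prjV P hsor, pv_prjW P hsor, pv_prlV P, pv_prlW P]
    rfl
  rw [hcurrA, hcostB]
  -- A's loop
  rw [PySem.List.pyRange_one_cons (show (1 : Int) < M + 1 by omega), List.foldl_cons,
    show (1 : Int) + 1 = 2 from by norm_num]
  rw [show planningStepA (pvF P) none 1 = some (1, pvF P 1) from rfl]
  obtain ⟨rA, hfoldA, hmemA, hminA, htieA⟩ :=
    pv_loopA (pvF P) (PySem.List.pyRange 2 (M + 1)) 1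
      (PySem.List.pairwise_lt_pyRange_one 2 (M + 1))
      (fun y hy => by rw [PySem.List.mem_pyRange_one] at hy; omega)
  rw [hfoldA]
  -- range membership as bounds
  have hmemR : ∀ y : Int, (y ∈ (1 : Int) :: PySem.List.pyRange 2 (M + 1)) ↔ (1 ≤ y ∧ y ≤ M) := by
    intro y
    simp [PySem.List.mem_pyRange_one]
    omega
  have hrA : 1 ≤ rA ∧ rA ≤ M := (hmemR rA).mp hmemA
  have hminA' : ∀ y, 1 ≤ y → y ≤ M → pvF P rA ≤ pvF P y :=
    fun y h1 h2 => hminA y ((hmemR y).mpr ⟨h1, h2⟩)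
  have htieA' : ∀ y, 1 ≤ y → y ≤ M → pvF P y = pvF P rA → rA ≤ y :=
    fun y h1 h2 => htieA y ((hmemR y).mpr ⟨h1, h2⟩)
  -- B's min over the candidate list
  set candsF := (([(1 : Int), M] ++ (P.map (fun p => p.1)).flatMap (fun x => [x, x + 1])).filter
      (fun e => decide (1 ≤ e) && decide (e ≤ M))) with hcandsF
  have hmemC : ∀ y : Int, y ∈ candsF ↔
      ((y = 1 ∨ y = M ∨ ∃ p ∈ P, y = p.1 ∨ y = p.1 + 1) ∧ 1 ≤ y ∧ y ≤ M) := by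
    intro y
    rw [hcandsF]
    simp [List.mem_filter, List.mem_flatMap]
  have hcne : candsF ≠ [] := by
    apply List.ne_nil_of_mem (a := (1 : Int))
    rw [hmemC]
    exact ⟨Or.inl rfl, le_refl 1, hm1'⟩
  obtain ⟨rB, hminB, hrBmem, hpropB⟩ := pv_min2_spec (pvF P) candsF hcne
  rw [hminB]
  -- rA is a candidate
  have hrAc : rA ∈ candsF := by
    rw [hmemC]
    refine ⟨?_, hrA.1, hrA.2⟩
    by_contra hno
    push Not at hno
    obtain ⟨h1, hm, hxs⟩ := hno
    have hgt1 : 1 < rA := by omega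
    have hltm : rA < M := by omega
    have hne1 : ∀ p ∈ P, p.1 ≠ rA - 1 := by
      intro p hp
      have := hxs p hp
      omega
    have hne2 : ∀ p ∈ P, p.1 ≠ rA := by
      intro p hp
      have := hxs p hp
      omega
    have hs1 := pv_slope P (rA - 1) hne1
    have hs2 := pv_slope P rA hne2
    rw [show rA - 1 + 1 = rA from by ring] at hs1
    have hW2 : pvW P rA = pvW P (rA - 1) := by
      have hflt := pv_flt_congr P (rA - 1) hne1
      rw [show rA - 1 + 1 = rA from by ring] at hflt
      unfold pvW
      rw [hflt]
    have hFlt : pvF P rA < pvF P (rA - 1) := by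
      have hle := hminA' (rA - 1) (by omega) (by omega)
      have htr := htieA' (rA - 1) (by omega) (by omega)
      by_cases heq : pvF P (rA - 1) = pvF P rA
      · exfalso
        have := htr heq
        omega
      · omega
    have hcontr : pvF P (rA + 1) < pvF P rA := by
      have : pvF P (rA + 1) - pvF P rA = pvF P rA - pvF P (rA - 1) := by
        rw [hs1, hs2, hW2]
      omega
    have := hminA' (rA + 1) (by omega) (by omega)
    omega
  -- conclude rA = rB
  have hBrA := hpropB rA hrAc
  have hrB' := (hmemC rB).mp hrBmem
  have hArB := hminA' rB hrB'.2.1 hrB'.2.2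
  have hEq : rA = rB := by
    rcases hBrA with h | ⟨h1, h2⟩
    · omega
    · have := htieA' rB hrB'.2.1 hrB'.2.2 (by omega)
      omega
  show (rA, pvF P rA) = (rB, pvF P rB)
  rw [hEq]
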